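-- pv_equiv track=rewrite | github.com/AP-MI-2021/lab-2-VladIvanescuUBB | main.py | sterge_prima_cifra
-- ===== SOURCE A (Python) =====
-- def sterge_prima_cifra(n):
--     '''
--     functia sterge prima cifra a unui numar
--     :param n: un numar intreg
--     :return: numarul n, fara prima cifra
--     '''
--     nr_nou = 0
--     p = 1
--     while n > 9:
--         nr_nou = n % 10 * p + nr_nou
--         p = p * 10
--         n = n // 10
--     return nr_nou
-- ===== SOURCE B (Python) =====
-- def sterge_prima_cifra(n):
--     '''
--     functia sterge prima cifra a unui numar
--     :param n: un numar intreg
--     :return: numarul n, fara prima cifra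
--     '''
--     if n <= 9:
--         return 0
--     p = 1
--     while p * 10 <= n:
--         p = p * 10
--     return n % p
-- ===== Notes on version B (the rewrite author's own statement) =====
-- stated objective: alternative
-- what changed: Instead of accumulating the trailing digits into a new number digit by digit, B locates the leading power of ten with a multiplicative loop and removes the first digit with a single modulo.
import Mathlib
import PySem

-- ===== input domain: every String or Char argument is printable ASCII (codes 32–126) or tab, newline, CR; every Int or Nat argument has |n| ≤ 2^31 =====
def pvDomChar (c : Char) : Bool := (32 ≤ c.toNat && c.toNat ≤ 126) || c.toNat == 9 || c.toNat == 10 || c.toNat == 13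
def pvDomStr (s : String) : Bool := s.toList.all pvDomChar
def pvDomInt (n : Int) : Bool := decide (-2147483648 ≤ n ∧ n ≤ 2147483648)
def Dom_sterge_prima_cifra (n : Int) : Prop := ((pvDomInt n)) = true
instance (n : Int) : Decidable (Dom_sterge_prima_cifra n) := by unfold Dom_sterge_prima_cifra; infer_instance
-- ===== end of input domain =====

-- B replaces A's digit-by-digit reconstruction of the trailing digits with one modulo by the
-- leading power of ten (an alternative decomposition; return values agree on every integer).
-- Both loops are ported with a Nat fuel of n.toNat, which only makes the recursion structural:
-- each loop provably stops within that many iterations, so the fuel never runs out.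

-- ===== PORT A =====
-- while n > 9: nr_nou = n % 10 * p + nr_nou; p = p * 10; n = n // 10
def stergeALoop : Nat → Int → Int → Int → Int
  | 0, _, nr_nou, _ => nr_nou
  | fuel + 1, n, nr_nou, p =>
    if 9 < n then
      stergeALoop fuel (PySem.Int.floordiv n 10) (PySem.Int.mod n 10 * p + nr_nou) (p * 10)
    else nr_nou

def sterge_prima_cifra (n : Int) : Int := stergeALoop n.toNat n 0 1

-- ===== PORT B =====
-- if n <= 9: return 0;  p = 1; while p * 10 <= n: p = p * 10;  return n % p
def findPLoop : Nat → Int → Int → Int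
  | 0, _, p => p
  | fuel + 1, n, p => if p * 10 ≤ n then findPLoop fuel n (p * 10) else p

def sterge_prima_cifra_alt (n : Int) : Int :=
  if n ≤ 9 then 0 else PySem.Int.mod n (findPLoop n.toNat n 1)

-- ===== PRECONDITION & SPEC =====
def Spec_sterge_prima_cifra (n : Int) (out : Int) : Prop := out = sterge_prima_cifra_alt n
instance (n : Int) (out : Int) : Decidable (Spec_sterge_prima_cifra n out) := by unfold Spec_sterge_prima_cifra; infer_instance

-- ===== CLAIM (what is proved, stated in full; the proofs are below) =====
def Claim_equal_sterge_prima_cifra : Prop := ∀ (n : Int), Dom_sterge_prima_cifra n → Spec_sterge_prima_cifra n (sterge_prima_cifra n)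

-- ===== LEMMAS AND PROOFS =====

theorem ediv10_lt (n : Int) (h : 9 < n) : n / 10 < n ∧ 0 ≤ n / 10 := by
  have h1 := Int.mul_ediv_add_emod n 10
  have h2 : 0 ≤ n % 10 := Int.emod_nonneg n (by omega)
  have h3 : n % 10 < 10 := Int.emod_lt_of_pos n (by omega)
  omega

theorem floordiv10_toNat_lt (n : Int) (h : 9 < n) : (PySem.Int.floordiv n 10).toNat < n.toNat := by
  rw [PySem.Int.floordiv_eq_ediv_of_pos (by omega : (0:Int) < 10)]
  have := ediv10_lt n h
  omega

-- fuel-free (well-founded) versions of the two loops, used only by the proofs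
def stergeAW (n nr_nou p : Int) : Int :=
  if h : 9 < n then
    stergeAW (PySem.Int.floordiv n 10) (PySem.Int.mod n 10 * p + nr_nou) (p * 10)
  else nr_nou
termination_by n.toNat
decreasing_by exact floordiv10_toNat_lt n h

def findPW (n p : Int) : Int :=
  if h : 0 < p ∧ p * 10 ≤ n then findPW n (p * 10) else p
termination_by (n - p).toNat
decreasing_by omega

-- fuel adequacy: with fuel ≥ n.toNat the fueled A-loop equals the fuel-free one
theorem stergeALoop_fuel (fuel : Nat) (n nr p : Int) (hf : n.toNat ≤ fuel) :
    stergeALoop fuel n nr p = stergeAW n nr p := by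
  induction fuel generalizing n nr p with
  | zero =>
      rw [stergeALoop, stergeAW, dif_neg (by omega)]
  | succ fuel ih =>
      by_cases h : 9 < n
      · rw [stergeALoop, if_pos h, stergeAW, dif_pos h,
          ih _ _ _ (by have := floordiv10_toNat_lt n h; omega)]
      · rw [stergeALoop, if_neg h, stergeAW, dif_neg h]

-- fuel adequacy for B's loop (0 < p is the loop invariant; fuel ≥ (n - p).toNat suffices)
theorem findPLoop_fuel (fuel : Nat) (n p : Int) (hp : 0 < p) (hf : (n - p).toNat ≤ fuel) :
    findPLoop fuel n p = findPW n p := by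
  induction fuel generalizing p with
  | zero =>
      rw [findPLoop, findPW, dif_neg (by omega)]
  | succ fuel ih =>
      by_cases h : p * 10 ≤ n
      · rw [findPLoop, if_pos h, findPW, dif_pos ⟨hp, h⟩, ih (p * 10) (by omega) (by omega)]
      · rw [findPLoop, if_neg h, findPW, dif_neg (by omega)]

-- A's loop in terms of its zero-accumulator form.
theorem stergeAW_acc (n nr p : Int) :
    stergeAW n nr p = nr + p * stergeAW n 0 1 := by
  by_cases h : 9 < n
  · rw [stergeAW, dif_pos h,
      stergeAW_acc (PySem.Int.floordiv n 10) (PySem.Int.mod n 10 * p + nr) (p * 10)]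
    conv_rhs => rw [stergeAW, dif_pos h]
    rw [stergeAW_acc (PySem.Int.floordiv n 10) (PySem.Int.mod n 10 * 1 + 0) (1 * 10)]
    ring
  · rw [stergeAW, dif_neg h, stergeAW, dif_neg h]; ring
termination_by n.toNat
decreasing_by all_goals exact floordiv10_toNat_lt n h

theorem findPW_pos (n p : Int) (hp : 0 < p) : 0 < findPW n p := by
  by_cases h : 0 < p ∧ p * 10 ≤ n
  · rw [findPW, dif_pos h]; exact findPW_pos n (p * 10) (by omega)
  · rw [findPW, dif_neg h]; exact hp
termination_by (n - p).toNat
decreasing_by omega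

-- commuting findPW with dividing n by 10 / scaling p by 10
theorem findPW_mul (n p : Int) (hp : 0 < p) (hn : 0 ≤ n) :
    findPW n (10 * p) = 10 * findPW (n / 10) p := by
  have hds : n / 10 ≤ n := Int.ediv_le_self _ hn
  have key : (0 < 10 * p ∧ 10 * p * 10 ≤ n) ↔ (0 < p ∧ p * 10 ≤ n / 10) := by
    constructor
    · rintro ⟨h1, h2⟩; exact ⟨by omega, (Int.le_ediv_iff_mul_le (by omega)).2 (by omega)⟩
    · rintro ⟨h1, h2⟩
      have := (Int.le_ediv_iff_mul_le (by omega : (0:Int) < 10)).1 h2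
      exact ⟨by omega, by omega⟩
  by_cases h : 0 < p ∧ p * 10 ≤ n / 10
  · rw [findPW, dif_pos (key.2 h)]
    conv_rhs => rw [findPW, dif_pos h]
    rw [show 10 * p * 10 = 10 * (p * 10) by ring,
      findPW_mul n (p * 10) (by omega) hn]
  · rw [findPW, dif_neg (fun hc => h (key.1 hc))]
    conv_rhs => rw [findPW, dif_neg h]
termination_by (n - p).toNat
decreasing_by
  have : p * 10 ≤ n := le_trans h.2 hds
  omega

-- splitting a modulo by 10*q into the last digit plus 10 times a modulo by q
theorem emod_ten_split (n q : Int) (hq : 0 < q) :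
    n % (10 * q) = n % 10 + 10 * (n / 10 % q) := by
  have h1 : n = 10 * (n / 10) + n % 10 := by
    have := Int.mul_ediv_add_emod n 10; omega
  have h2 : n / 10 = q * (n / 10 / q) + n / 10 % q := (Int.mul_ediv_add_emod _ q).symm
  have hr : 0 ≤ n % 10 ∧ n % 10 < 10 := ⟨Int.emod_nonneg n (by omega), Int.emod_lt_of_pos n (by omega)⟩
  have hm : 0 ≤ n / 10 % q ∧ n / 10 % q < q := ⟨Int.emod_nonneg _ (by omega), Int.emod_lt_of_pos _ hq⟩
  have step : n % (10 * q) = (n % 10 + 10 * (n / 10 % q) + (10 * q) * (n / 10 / q)) % (10 * q) := by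
    conv_lhs => rw [h1]
    conv_lhs => rw [h2]
    ring_nf
  rw [step, Int.add_mul_emod_self_left, Int.emod_eq_of_lt (by omega) (by omega)]

-- main induction: A's zero-accumulator loop equals B's "one modulo by the leading power of 10"
theorem main_eq (n : Int) :
    stergeAW n 0 1 = if n ≤ 9 then 0 else PySem.Int.mod n (findPW n 1) := by
  by_cases h9 : n ≤ 9
  · rw [stergeAW, dif_neg (by omega), if_pos h9]
  · have hn : 9 < n := by omega
    have hn0 : (0:Int) ≤ n := by omega
    rw [if_neg h9, PySem.Int.mod_eq_emod_of_pos (findPW_pos n 1 one_pos)]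
    rw [stergeAW, dif_pos hn, stergeAW_acc]
    rw [PySem.Int.floordiv_eq_ediv_of_pos (by omega : (0:Int) < 10),
      PySem.Int.mod_eq_emod_of_pos (by omega : (0:Int) < 10)]
    have hstep : findPW n 1 = findPW n 10 := by
      conv_lhs => rw [findPW]
      rw [dif_pos ⟨one_pos, (by omega : (1:Int) * 10 ≤ n)⟩]
      norm_num
    have hmul := findPW_mul n 1 one_pos hn0
    norm_num at hmul
    rw [hstep, hmul]
    by_cases h2 : n / 10 ≤ 9
    · have hz : stergeAW (n / 10) 0 1 = 0 := by rw [stergeAW, dif_neg (by omega)]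
      have hp : findPW (n / 10) 1 = 1 := by
        rw [findPW, dif_neg]; omega
      rw [hz, hp, emod_ten_split n 1 one_pos]
      simp
    · have hrec := main_eq (n / 10)
      rw [if_neg h2, PySem.Int.mod_eq_emod_of_pos (findPW_pos (n / 10) 1 one_pos)] at hrec
      rw [hrec, emod_ten_split n (findPW (n / 10) 1) (findPW_pos _ 1 one_pos)]
      ring
termination_by n.toNat
decreasing_by
  have := ediv10_lt n (by omega)
  omega

-- ===== VERDICT (by name: the statement is the Claim_ definition above) =====
theorem sterge_prima_cifra_spec : Claim_equal_sterge_prima_cifra := by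
  intro n _
  unfold Spec_sterge_prima_cifra sterge_prima_cifra sterge_prima_cifra_alt
  rw [stergeALoop_fuel n.toNat n 0 1 le_rfl, main_eq n,
    findPLoop_fuel n.toNat n 1 one_pos (by omega)]
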